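-- pv_equiv track=rewrite | github.com/samabarker/advent-2020 | advent20.py | consecutives
-- ===== SOURCE A (Python) =====
-- def consecutives(listz):
--     results = []
--     counter = 1
--     for i in range(1,len(listz)):
--         if listz[i] - listz[i-1] == 1:
--            counter += 1
--         else:
--             results.append(counter)
--             counter = 1
--
--         if i == (len(listz) - 1) and counter != 1:
--             results.append(counter)
--     return(results)
-- ===== SOURCE B (Python) =====
-- def consecutives(listz):
--     # Boundary-index algorithm: collect the positions where the +1 chain breaks,
--     # derive each run length as the difference of adjacent cut positions,
--     # then drop the trailing run iff its length is 1.
--     if not listz: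
--         return []
--     n = len(listz)
--     cuts = [0] + [i for i in range(1, n) if listz[i] - listz[i - 1] != 1] + [n]
--     runs = [b - a for a, b in zip(cuts, cuts[1:])]
--     if runs[-1] == 1:
--         runs.pop()
--     return runs
-- ===== Notes on version B (the rewrite author's own statement) =====
-- stated objective: alternative
-- what changed: B replaces A's running-counter scan with a boundary-index algorithm: it collects the cut positions where the +1 chain breaks, derives each run length as the difference of adjacent cuts, and drops a trailing length-1 run as a post-processing step.
import Mathlib
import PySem

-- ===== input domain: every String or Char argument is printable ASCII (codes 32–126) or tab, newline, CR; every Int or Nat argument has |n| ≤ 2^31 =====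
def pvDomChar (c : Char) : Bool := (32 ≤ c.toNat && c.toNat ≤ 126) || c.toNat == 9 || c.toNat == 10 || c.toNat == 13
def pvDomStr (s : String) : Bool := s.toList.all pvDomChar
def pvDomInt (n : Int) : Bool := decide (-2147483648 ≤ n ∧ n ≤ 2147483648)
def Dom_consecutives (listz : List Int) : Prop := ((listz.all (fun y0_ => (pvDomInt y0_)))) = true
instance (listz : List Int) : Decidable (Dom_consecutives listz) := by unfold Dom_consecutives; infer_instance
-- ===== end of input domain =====

-- B is a boundary-index algorithm: cut positions where the +1 chain breaks, run lengths as
-- differences of adjacent cuts, trailing length-1 run dropped afterwards (alternative decomposition).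

-- ===== PORT A =====
-- loop body of A, one iteration of 'for i in range(1, len(listz))'
-- (indices i, i-1 are always in range here, so pyGetD with default 0 is exact)
def stepA (listz : List Int) (s : List Int × Int) (i : Int) : List Int × Int :=
  let s' := if PySem.List.pyGetD listz i 0 - PySem.List.pyGetD listz (i - 1) 0 = 1
            then (s.1, s.2 + 1)
            else (s.1 ++ [s.2], (1 : Int))
  if i = (listz.length : Int) - 1 ∧ s'.2 ≠ 1 then (s'.1 ++ [s'.2], s'.2) else s'

def consecutives (listz : List Int) : List Int :=
  ((PySem.List.pyRange 1 (listz.length : Int) 1).foldl (stepA listz) ([], 1)).1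

-- ===== PORT B =====
-- literal port of Source B; indices i, i-1 in the comprehension are always in range, so pyGetD 0 is exact
def consecutives_alt (listz : List Int) : List Int :=
  if listz = [] then []
  else
    let n : Int := (listz.length : Int)
    let cuts : List Int := 0 :: ((PySem.List.pyRange 1 n 1).filter
        (fun i => decide (PySem.List.pyGetD listz i 0 - PySem.List.pyGetD listz (i - 1) 0 ≠ 1)) ++ [n])
    let runs := List.zipWith (fun a b => b - a) cuts cuts.tail
    if runs.getLast? = some 1 then runs.dropLast else runs

-- ===== PRECONDITION & SPEC =====
def Spec_consecutives (listz : List Int) (out : List Int) : Prop := out = consecutives_alt listz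
instance (listz : List Int) (out : List Int) : Decidable (Spec_consecutives listz out) := by unfold Spec_consecutives; infer_instance

-- ===== CLAIM (what is proved, stated in full; the proofs are below) =====
def Claim_equal_consecutives : Prop := ∀ (listz : List Int), Dom_consecutives listz → Spec_consecutives listz (consecutives listz)

-- ===== LEMMAS AND PROOFS =====

-- reference: the lengths of all maximal consecutive-increment runs of prev :: l, last run open with count c
def runsGo (prev c : Int) : List Int → List Int
  | [] => [c]
  | y :: ys => if y - prev = 1 then runsGo y (c + 1) ys else c :: runsGo y 1 ys

def dropLastIfOne (l : List Int) : List Int := if l.getLast? = some 1 then l.dropLast else l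

-- the break positions of prev :: l, positions counted from i
def breaks (prev : Int) : List Int → Int → List Int
  | [], _ => []
  | y :: ys, i => if y - prev = 1 then breaks y ys (i + 1) else i :: breaks y ys (i + 1)

-- adjacent differences
def diffs : List Int → List Int
  | a :: b :: t => (b - a) :: diffs (b :: t)
  | _ => []

theorem runsGo_ne_nil (prev c : Int) (l : List Int) : runsGo prev c l ≠ [] := by
  induction l generalizing prev c with
  | nil => simp [runsGo]
  | cons y ys ih => simp only [runsGo]; split <;> simp [ih]

theorem dropLastIfOne_cons (a : Int) (l : List Int) (h : l ≠ []) :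
    dropLastIfOne (a :: l) = a :: dropLastIfOne l := by
  unfold dropLastIfOne
  cases l with
  | nil => exact absurd rfl h
  | cons b bs =>
    simp only [List.getLast?_cons_cons,
      List.dropLast_cons_of_ne_nil (l := b :: bs) (by simp)]
    split <;> rfl

theorem zipWith_tail_eq_diffs (l : List Int) :
    List.zipWith (fun a b => b - a) l l.tail = diffs l := by
  induction l with
  | nil => rfl
  | cons a t ih =>
    cases t with
    | nil => rfl
    | cons b s =>
      simp only [List.tail_cons, List.zipWith_cons_cons, diffs]
      simpa [List.tail_cons] using congrArg (List.cons (b - a)) ih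

theorem diffs_breaks (l : List Int) : ∀ (prev a i e : Int), e = i + l.length →
    diffs (a :: (breaks prev l i ++ [e])) = runsGo prev (i - a) l := by
  induction l with
  | nil =>
    intro prev a i e he
    have h0 : e = i := by simpa using he
    subst h0
    simp [breaks, diffs, runsGo]
  | cons y ys ih =>
    intro prev a i e he
    have he' : e = (i + 1) + ys.length := by
      simp only [List.length_cons] at he; push_cast at he ⊢; omega
    by_cases h : y - prev = 1
    · have := ih y a (i + 1) e he'
      simp only [breaks, if_pos h, runsGo]
      rw [this]
      congr 1; ring
    · simp only [breaks, if_neg h, runsGo, List.cons_append, diffs]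
      rw [ih y i (i + 1) e he']
      norm_num

theorem filter_breaks (rest : List Int) : ∀ (pre : List Int) (prev : Int),
    (PySem.List.pyRange ((pre.length : Int) + 1) (((pre ++ prev :: rest).length : Int)) 1).filter
      (fun i => decide (PySem.List.pyGetD (pre ++ prev :: rest) i 0
          - PySem.List.pyGetD (pre ++ prev :: rest) (i - 1) 0 ≠ 1))
    = breaks prev rest ((pre.length : Int) + 1) := by
  induction rest with
  | nil =>
    intro pre prev
    rw [PySem.List.pyRange_one_eq_nil (by simp)]
    rfl
  | cons y ys ih =>
    intro pre prev
    have hlt : (pre.length : Int) + 1 < ((pre ++ prev :: y :: ys).length : Int) := by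
      simp only [List.length_append, List.length_cons]; push_cast; omega
    rw [PySem.List.pyRange_one_cons hlt, List.filter_cons]
    have hy : PySem.List.pyGetD (pre ++ prev :: y :: ys) ((pre.length : Int) + 1) 0 = y := by
      have h1 : ((pre.length : Int) + 1) = ((pre.length + 1 : Nat) : Int) := by push_cast; ring
      rw [h1, PySem.List.pyGetD_natCast]; simp
    have hp : PySem.List.pyGetD (pre ++ prev :: y :: ys) ((pre.length : Int) + 1 - 1) 0 = prev := by
      have h1 : ((pre.length : Int) + 1 - 1) = ((pre.length : Nat) : Int) := by ring
      rw [h1, PySem.List.pyGetD_natCast]; simp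
    have hpre : ((pre ++ [prev]).length : Int) = (pre.length : Int) + 1 := by simp
    have hassoc : (pre ++ [prev]) ++ y :: ys = pre ++ prev :: y :: ys := by simp
    have htail := ih (pre ++ [prev]) y
    rw [hpre, hassoc] at htail
    simp only [hy, hp, breaks]
    by_cases h : y - prev = 1
    · simp only [h]
      rw [if_neg (by simp)]
      exact htail
    · rw [if_pos (by simp [h]), if_neg h, htail]

theorem altB (x : Int) (xs : List Int) :
    consecutives_alt (x :: xs) = dropLastIfOne (runsGo x 1 xs) := by
  unfold consecutives_alt
  rw [if_neg (by simp)]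
  have hf := filter_breaks xs [] x
  rw [List.nil_append] at hf
  simp only [List.length_nil, Int.natCast_zero, zero_add] at hf
  simp only [zipWith_tail_eq_diffs]
  rw [hf]
  have hd := diffs_breaks xs x 0 1 ((x :: xs).length : Int) (by simp; ring)
  simp only [sub_zero] at hd
  rw [hd]
  rfl

-- A's loop invariant: from position pre.length+1 onward, with open run count c
theorem loopA (rest : List Int) : ∀ (pre : List Int) (prev : Int) (results : List Int) (c : Int),
    rest ≠ [] →
    ((PySem.List.pyRange ((pre.length : Int) + 1) (((pre ++ prev :: rest).length : Int)) 1).foldl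
        (stepA (pre ++ prev :: rest)) (results, c)).1
      = results ++ dropLastIfOne (runsGo prev c rest) := by
  induction rest with
  | nil => intro _ _ _ _ h; exact absurd rfl h
  | cons y ys ih =>
    intro pre prev results c _
    have hlt : (pre.length : Int) + 1 < ((pre ++ prev :: y :: ys).length : Int) := by
      simp only [List.length_append, List.length_cons]; push_cast; omega
    rw [PySem.List.pyRange_one_cons hlt, List.foldl_cons]
    have hy : PySem.List.pyGetD (pre ++ prev :: y :: ys) ((pre.length : Int) + 1) 0 = y := by
      have h1 : ((pre.length : Int) + 1) = ((pre.length + 1 : Nat) : Int) := by push_cast; ring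
      rw [h1, PySem.List.pyGetD_natCast]
      simp
    have hp : PySem.List.pyGetD (pre ++ prev :: y :: ys) ((pre.length : Int) + 1 - 1) 0 = prev := by
      have h1 : ((pre.length : Int) + 1 - 1) = ((pre.length : Nat) : Int) := by ring
      rw [h1, PySem.List.pyGetD_natCast]
      simp
    cases ys with
    | nil =>
      -- last iteration: i = len - 1, and the range beyond it is empty
      have hend : (pre.length : Int) + 1 = ((pre ++ prev :: [y]).length : Int) - 1 := by
        simp only [List.length_append, List.length_cons, List.length_nil]; push_cast; ring
      have hnil : PySem.List.pyRange ((pre.length : Int) + 1 + 1)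
          (((pre ++ prev :: [y]).length : Int)) 1 = [] := by
        apply PySem.List.pyRange_one_eq_nil
        simp only [List.length_append, List.length_cons, List.length_nil]; push_cast; omega
      rw [hnil, List.foldl_nil]
      simp only [stepA, hy, hp]
      by_cases h1 : y - prev = 1
      · rw [if_pos h1]
        by_cases h2 : c + 1 = 1
        · rw [if_neg (fun h => h.2 h2)]
          simp [runsGo, h1, dropLastIfOne, h2]
        · rw [if_pos ⟨hend, h2⟩]
          simp [runsGo, h1, dropLastIfOne, h2]
      · rw [if_neg h1, if_neg (fun h => h.2 rfl)]
        simp [runsGo, h1, dropLastIfOne]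
    | cons z zs =>
      have hne : ¬ ((pre.length : Int) + 1 = ((pre ++ prev :: y :: z :: zs).length : Int) - 1) := by
        simp only [List.length_append, List.length_cons]; push_cast; omega
      have hpre : ((pre ++ [prev]).length : Int) = (pre.length : Int) + 1 := by simp
      have hassoc : (pre ++ [prev]) ++ y :: z :: zs = pre ++ prev :: y :: z :: zs := by simp
      have hstep : stepA (pre ++ prev :: y :: z :: zs) (results, c) ((pre.length : Int) + 1)
          = if y - prev = 1 then (results, c + 1) else (results ++ [c], 1) := by
        simp only [stepA, hy, hp]
        split
        · exact if_neg (fun h => hne h.1)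
        · exact if_neg (fun h => hne h.1)
      rw [hstep]
      by_cases h1 : y - prev = 1
      · rw [if_pos h1]
        have := ih (pre ++ [prev]) y results (c + 1) (by simp)
        rw [hpre, hassoc] at this
        rw [this]
        simp only [runsGo, if_pos h1]
      · rw [if_neg h1]
        have := ih (pre ++ [prev]) y (results ++ [c]) 1 (by simp)
        rw [hpre, hassoc] at this
        have hr : runsGo prev c (y :: z :: zs) = c :: runsGo y 1 (z :: zs) := by
          simp [runsGo, h1]
        rw [this, hr, dropLastIfOne_cons c _ (runsGo_ne_nil y 1 (z :: zs)),
          List.append_assoc, List.singleton_append]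

-- ===== VERDICT (by name: the statement is the Claim_ definition above) =====
theorem consecutives_spec : Claim_equal_consecutives := by
  intro listz _
  unfold Spec_consecutives
  match listz with
  | [] => rfl
  | [x] => rfl
  | x :: y :: ys =>
    rw [altB]
    have := loopA (y :: ys) [] x [] 1 (by simp)
    simpa [consecutives] using this
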